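-- pv_equiv track=rewrite | github.com/Sh-OV/Study_Python | Seminar_2/Example_6.py | Function_list_filling
-- ===== SOURCE A (Python) =====
-- def Function_list_filling (count):
--     my_list = []
--     num = 2
--     dig = 1
--     my_list.append(dig)
--     while num <= count:
--         dig *= -3
--         my_list.append(dig)
--         num += 1
--     return my_list
-- ===== SOURCE B (Python) =====
-- def Function_list_filling(count):
--     return [(-3) ** i for i in range(max(count, 1))]
-- ===== Notes on version B (the rewrite author's own statement) =====
-- stated objective: simpler
-- what changed: Replaces the while-loop that maintains a running product accumulator by a one-line comprehension that computes each element independently by closed-form exponentiation of the base at its index, over the index range clamped to at least one to cover the always-present leading element.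
import Mathlib
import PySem

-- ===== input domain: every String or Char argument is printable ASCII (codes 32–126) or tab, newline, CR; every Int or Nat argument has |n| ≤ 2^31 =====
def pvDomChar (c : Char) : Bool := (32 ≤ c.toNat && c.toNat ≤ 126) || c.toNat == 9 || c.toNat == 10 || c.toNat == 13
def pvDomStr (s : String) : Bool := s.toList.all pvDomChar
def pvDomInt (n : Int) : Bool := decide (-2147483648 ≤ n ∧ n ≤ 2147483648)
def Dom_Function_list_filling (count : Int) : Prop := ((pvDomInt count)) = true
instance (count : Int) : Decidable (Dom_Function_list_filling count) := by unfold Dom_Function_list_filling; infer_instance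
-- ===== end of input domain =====

-- B replaces A's while-loop with its running-product accumulator by a comprehension
-- computing each element independently by closed-form exponentiation at its index (simpler).

-- ===== PORT A =====
-- the while loop: state (num, dig, my_list); recursion measured by (count + 1 - num).toNat
def Function_list_filling_loop (count num dig : Int) (myList : List Int) : List Int :=
  if _h : num ≤ count then
    Function_list_filling_loop count (num + 1) (dig * -3) (myList ++ [dig * -3])
  else myList
termination_by (count + 1 - num).toNat
decreasing_by omega

def Function_list_filling (count : Int) : List Int :=
  Function_list_filling_loop count 2 1 ([] ++ [1])

-- ===== PORT B =====
def Function_list_filling_alt (count : Int) : List Int :=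
  (PySem.List.pyRange 0 (max count 1) 1).map (fun i => (-3 : Int) ^ i.toNat)

-- ===== PRECONDITION & SPEC =====
def Spec_Function_list_filling (count : Int) (out : List Int) : Prop := out = Function_list_filling_alt count
instance (count : Int) (out : List Int) : Decidable (Spec_Function_list_filling count out) := by unfold Spec_Function_list_filling; infer_instance

-- ===== CLAIM (what is proved, stated in full; the proofs are below) =====
def Claim_equal_Function_list_filling : Prop := ∀ (count : Int), Dom_Function_list_filling count → Spec_Function_list_filling count (Function_list_filling count)

-- ===== LEMMAS AND PROOFS =====

-- loop invariant: the loop appends dig·(-3)^(k+1) for k = 0 .. (count-num).toNat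
theorem Function_list_filling_loop_eq (count : Int) (num dig : Int) (acc : List Int) :
    Function_list_filling_loop count num dig acc =
      acc ++ (List.range (count + 1 - num).toNat).map (fun k => dig * (-3 : Int) ^ (k + 1)) := by
  by_cases h : num ≤ count
  · rw [Function_list_filling_loop, dif_pos h,
      Function_list_filling_loop_eq count (num + 1) (dig * -3) (acc ++ [dig * -3])]
    have hn : (count + 1 - num).toNat = (count + 1 - (num + 1)).toNat + 1 := by omega
    rw [hn, List.append_assoc]
    congr 1
    rw [List.range_succ_eq_map, List.map_cons, List.map_map]
    simp only [List.singleton_append, List.cons.injEq]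
    constructor
    · simp
    · apply List.map_congr_left
      intro k _
      simp only [Function.comp, pow_succ]
      ring
  · rw [Function_list_filling_loop, dif_neg h]
    have : (count + 1 - num).toNat = 0 := by omega
    simp [this]
termination_by (count + 1 - num).toNat
decreasing_by omega

theorem Function_list_filling_spec : Claim_equal_Function_list_filling := by
  intro count _
  unfold Spec_Function_list_filling Function_list_filling Function_list_filling_alt
  rw [Function_list_filling_loop_eq, PySem.List.pyRange_one]
  rw [List.map_map]
  have hm : (max count 1 - 0).toNat = (count + 1 - 2).toNat + 1 := by omega
  rw [hm, List.range_succ_eq_map, List.map_cons, List.map_map]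
  simp only [List.nil_append, List.singleton_append, List.cons.injEq]
  constructor
  · simp
  · apply List.map_congr_left
    intro k _
    simp only [Function.comp]
    have h1 : ((0 : Int) + ↑(k + 1)).toNat = k + 1 := by omega
    rw [h1]
    ring

-- ===== VERDICT (by name: the statement is the Claim_ definition above) =====
-- (Function_list_filling_spec is stated directly above; it is the verdict theorem.)
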